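-- pv_equiv track=rewrite | github.com/JayConnorSynrg/n8n-workflows | src/tools/composio_router.py | _auto_generate_prefixes
-- ===== SOURCE A (Python) =====
-- def _common_prefix(strings: list[str]) -> str:
--     """Find the longest common prefix of a list of strings."""
--     if not strings:
--         return ""
--     prefix = strings[0]
--     for s in strings[1:]:
--         while not s.startswith(prefix):
--             prefix = prefix[:-1]
--             if not prefix:
--                 return ""
--     return prefix
--
-- def _auto_generate_prefixes(by_service: dict[str, list[str]]) -> list[tuple[str, str]]:
--     """Generate SERVICE_PREFIXES dynamically from toolkit slug groupings.
--
--     Finds the common prefix for all slugs in each toolkit.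
--     Returns list of (PREFIX_, toolkit_key) sorted longest-first.
--     """
--     prefixes = []
--     for service_key, slugs in by_service.items():
--         if not slugs:
--             continue
--         if len(slugs) >= 2:
--             common = _common_prefix(slugs)
--             # Trim to last underscore boundary
--             last_us = common.rfind("_")
--             if last_us > 0:
--                 prefix = common[:last_us + 1]
--                 prefixes.append((prefix, service_key))
--         elif len(slugs) == 1:
--             # Single slug — use everything before the last segment
--             parts = slugs[0].split("_")
--             if len(parts) >= 2:
--                 prefix = "_".join(parts[:-1]) + "_"
--                 prefixes.append((prefix, service_key))
--     # Sort longest first to avoid partial matches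
--     prefixes.sort(key=lambda x: -len(x[0]))
--     return prefixes
-- ===== SOURCE B (Python) =====
-- def _common_prefix(strings: list[str]) -> str:
--     """Longest common prefix via a positional scan over zipped columns."""
--     if not strings:
--         return ""
--     i = 0
--     for chars in zip(*strings):
--         if len(set(chars)) > 1:
--             break
--         i += 1
--     return strings[0][:i]
--
-- def _prefix_entry(service_key, slugs):
--     if len(slugs) >= 2:
--         common = _common_prefix(slugs)
--         cut = common.rfind("_")
--         if cut > 0:
--             return (common[:cut + 1], service_key)
--     elif slugs:
--         parts = slugs[0].split("_")
--         if len(parts) >= 2: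
--             return ("_".join(parts[:-1]) + "_", service_key)
--     return None
--
-- def _auto_generate_prefixes(by_service: dict[str, list[str]]) -> list[tuple[str, str]]:
--     entries = (_prefix_entry(k, v) for k, v in by_service.items())
--     prefixes = [e for e in entries if e is not None]
--     return sorted(prefixes, key=lambda x: len(x[0]), reverse=True)
-- ===== Notes on version B (the rewrite author's own statement) =====
-- stated objective: alternative
-- what changed: The common prefix is found by a positional scan over zipped columns (grow from the left, stop at the first non-constant column) instead of A's per-string suffix-shrinking while-loop, and entries are collected by an Option-returning helper filtered into a list (sorted(..., reverse=True)) instead of A's accumulating loop with in-place sort on a negated key.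
import Mathlib
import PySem

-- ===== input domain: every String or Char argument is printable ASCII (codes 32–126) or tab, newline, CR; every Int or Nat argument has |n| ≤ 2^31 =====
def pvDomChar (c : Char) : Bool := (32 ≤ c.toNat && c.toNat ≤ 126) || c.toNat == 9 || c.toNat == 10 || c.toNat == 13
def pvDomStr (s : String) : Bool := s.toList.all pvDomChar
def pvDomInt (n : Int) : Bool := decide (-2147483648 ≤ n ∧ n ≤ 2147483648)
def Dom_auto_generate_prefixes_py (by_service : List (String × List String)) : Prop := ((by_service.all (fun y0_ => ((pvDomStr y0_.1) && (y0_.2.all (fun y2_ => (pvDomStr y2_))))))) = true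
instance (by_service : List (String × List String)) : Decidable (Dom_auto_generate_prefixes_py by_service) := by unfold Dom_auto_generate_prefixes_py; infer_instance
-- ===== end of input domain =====

-- B replaces A's suffix-shrinking common-prefix loop by a positional column scan and collects
-- entries with an Option-returning helper + filter instead of an accumulating loop ('alternative').

-- ===== PORT A =====
-- the 'while not s.startswith(prefix): prefix = prefix[:-1]; if not prefix: return ""' loop
-- (prefix[:-1] = dropLast, PySem.List.slice_to_neg_one); none = the early 'return ""'
def shrinkA (s : List Char) (pref : List Char) : Option (List Char) :=
  if PySem.Chars.startswith s pref then some pref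
  else
    let p := pref.dropLast
    if hp : p = [] then none else shrinkA s p
termination_by pref.length
decreasing_by
  have hne : pref ≠ [] := by intro h; exact hp (by subst h; rfl)
  have := List.length_pos_iff.mpr hne
  simp [List.length_dropLast]; omega

-- the 'for s in strings[1:]' loop of _common_prefix
def loopA : List Char → List (List Char) → List Char
  | pref, [] => pref
  | pref, s :: t =>
    match shrinkA s pref with
    | none => []
    | some p => loopA p t

def common_prefix (strings : List String) : String :=
  match strings with
  | [] => ""
  | s0 :: rest => String.ofList (loopA s0.toList (rest.map String.toList))

-- the body of 'for service_key, slugs in by_service.items()' in A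
def stepA (acc : List (String × String)) (p : String × List String) : List (String × String) :=
  let service_key := p.1
  let slugs := p.2
  if slugs = [] then acc
  else if 2 ≤ slugs.length then
    let common := (common_prefix slugs).toList
    let last_us := PySem.Chars.rfind common ['_']
    if 0 < last_us then
      acc ++ [(String.ofList (PySem.Chars.slice common none (some (last_us + 1))), service_key)]
    else acc
  else if slugs.length = 1 then
    let parts := PySem.Chars.splitOn ((slugs.headD "").toList) ['_']
    if 2 ≤ parts.length then
      acc ++ [(String.ofList (PySem.Chars.join ['_'] parts.dropLast ++ ['_']), service_key)]
    else acc
  else acc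

def auto_generate_prefixes_py (by_service : List (String × List String)) : List (String × String) :=
  let prefixes := by_service.foldl stepA []
  PySem.List.sorted prefixes (fun x => -(PySem.Str.len x.1)) false

-- ===== PORT B =====
-- zip(*rows): the list of columns, truncated at the shortest row
def pyZipStar (rows : List (List Char)) : List (List Char) :=
  match rows with
  | [] => []
  | r :: rs =>
    if r.isEmpty || rs.any (fun x => x.isEmpty) then []
    else (r.headD ' ' :: rs.map (fun x => x.headD ' ')) ::
         pyZipStar (r.tail :: rs.map (fun x => x.tail))
termination_by (rows.headD []).length
decreasing_by
  simp_all [List.isEmpty_iff]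
  have : r ≠ [] := by simp_all
  have := List.length_pos_iff.mpr this
  simp; omega

-- the 'for chars in zip(*strings): if len(set(chars)) > 1: break; i += 1' loop
def scanCols : List (List Char) → Nat → Nat
  | [], i => i
  | c :: cs, i => if 1 < PySem.Set.len (PySem.Set.ofList c) then i else scanCols cs (i + 1)

def common_prefix_alt (strings : List String) : String :=
  match strings with
  | [] => ""
  | s0 :: _ =>
    let i := scanCols (pyZipStar (strings.map String.toList)) 0
    String.ofList (PySem.Chars.slice s0.toList none (some (i : Int)))   -- strings[0][:i]

-- _prefix_entry: the Option-returning helper of Source B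
def prefix_entry (service_key : String) (slugs : List String) : Option (String × String) :=
  if 2 ≤ slugs.length then
    let common := (common_prefix_alt slugs).toList
    let cut := PySem.Chars.rfind common ['_']
    if 0 < cut then some (String.ofList (PySem.Chars.slice common none (some (cut + 1))), service_key)
    else none
  else if slugs ≠ [] then
    let parts := PySem.Chars.splitOn ((slugs.headD "").toList) ['_']
    if 2 ≤ parts.length then some (String.ofList (PySem.Chars.join ['_'] parts.dropLast ++ ['_']), service_key)
    else none
  else none

def auto_generate_prefixes_py_alt (by_service : List (String × List String)) : List (String × String) :=
  let prefixes := (by_service.map (fun p => prefix_entry p.1 p.2)).filterMap id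
  PySem.List.sorted prefixes (fun x => PySem.Str.len x.1) true

-- ===== PRECONDITION & SPEC =====
def Spec_auto_generate_prefixes_py (by_service : List (String × List String)) (out : List (String × String)) : Prop := out = auto_generate_prefixes_py_alt by_service
instance (by_service : List (String × List String)) (out : List (String × String)) : Decidable (Spec_auto_generate_prefixes_py by_service out) := by unfold Spec_auto_generate_prefixes_py; infer_instance

-- ===== CLAIM (what is proved, stated in full; the proofs are below) =====
def Claim_equal_auto_generate_prefixes_py : Prop := ∀ (by_service : List (String × List String)), Dom_auto_generate_prefixes_py by_service → Spec_auto_generate_prefixes_py by_service (auto_generate_prefixes_py by_service)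

-- ===== LEMMAS AND PROOFS =====

-- longest common prefix of two char lists (proof-side characterisation of both loops)
def lcp2 : List Char → List Char → List Char
  | a :: as, b :: bs => if a = b then a :: lcp2 as bs else []
  | _, _ => []

theorem lcp2_nil_left (ys : List Char) : lcp2 [] ys = [] := by cases ys <;> rfl

theorem lcp2_prefix_left (xs ys : List Char) : lcp2 xs ys <+: xs := by
  induction xs generalizing ys with
  | nil => simp [lcp2_nil_left]
  | cons a as ih =>
    cases ys with
    | nil => simp [lcp2]
    | cons b bs =>
      simp only [lcp2]
      split
      · next h => subst h; simp [List.cons_prefix_cons, ih]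
      · simp

theorem lcp2_prefix_right (xs ys : List Char) : lcp2 xs ys <+: ys := by
  induction xs generalizing ys with
  | nil => simp [lcp2_nil_left]
  | cons a as ih =>
    cases ys with
    | nil => simp [lcp2]
    | cons b bs =>
      simp only [lcp2]
      split
      · next h => subst h; simp [List.cons_prefix_cons, ih]
      · simp

theorem lcp2_of_prefix {xs ys : List Char} (h : xs <+: ys) : lcp2 xs ys = xs := by
  induction xs generalizing ys with
  | nil => simp [lcp2_nil_left]
  | cons a as ih =>
    cases ys with
    | nil => simp at h
    | cons b bs =>
      rw [List.cons_prefix_cons] at h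
      simp only [lcp2]
      rw [if_pos h.1, ih h.2]

theorem lcp2_dropLast {xs ys : List Char} (h : ¬ xs <+: ys) :
    lcp2 xs.dropLast ys = lcp2 xs ys := by
  induction xs generalizing ys with
  | nil => simp at h
  | cons a as ih =>
    cases ys with
    | nil =>
      cases as with
      | nil => rfl
      | cons a' as' => simp [lcp2]
    | cons b bs =>
      by_cases hab : a = b
      · subst hab
        have has : ¬ as <+: bs := fun hp => h (List.cons_prefix_cons.mpr ⟨rfl, hp⟩)
        cases as with
        | nil => simp at has
        | cons a' as' =>
          have : (a :: a' :: as').dropLast = a :: (a' :: as').dropLast := rfl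
          rw [this]
          simp only [lcp2]
          rw [ih has]
      · cases as with
        | nil => simp [lcp2, hab, lcp2_nil_left]
        | cons a' as' =>
          have : (a :: a' :: as').dropLast = a :: (a' :: as').dropLast := rfl
          rw [this]
          simp [lcp2, hab]

theorem startswith_nil (s : List Char) : PySem.Chars.startswith s [] = true := by
  rw [PySem.Chars.startswith_iff]; exact List.nil_prefix

theorem shrinkA_eq (s pref : List Char) :
    shrinkA s pref = if lcp2 pref s = [] ∧ pref ≠ [] then none else some (lcp2 pref s) := by
  induction pref using shrinkA.induct s with
  | case1 pref hsw =>
    have hp : pref <+: s := (PySem.Chars.startswith_iff s pref).mp hsw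
    rw [shrinkA, if_pos hsw, lcp2_of_prefix hp]
    by_cases hne : pref = []
    · subst hne; simp
    · simp [hne]
  | case2 pref hsw p hdrop =>
    have hne : pref ≠ [] := fun h => hsw (h ▸ startswith_nil s)
    have hnp : ¬ pref <+: s := fun h => hsw ((PySem.Chars.startswith_iff s pref).mpr h)
    have hd : pref.dropLast = [] := hdrop
    have hlcp : lcp2 pref s = [] := by
      rw [← lcp2_dropLast hnp, hd, lcp2_nil_left]
    rw [shrinkA, if_neg hsw]
    rw [dif_pos hd, if_pos ⟨hlcp, hne⟩]
  | case3 pref hsw p hdrop ih =>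
    have hne : pref ≠ [] := fun h => hsw (h ▸ startswith_nil s)
    have hnp : ¬ pref <+: s := fun h => hsw ((PySem.Chars.startswith_iff s pref).mpr h)
    have hlcp : lcp2 pref.dropLast s = lcp2 pref s := lcp2_dropLast hnp
    have hd : ¬ pref.dropLast = [] := hdrop
    have ih' : shrinkA s pref.dropLast
        = if lcp2 pref.dropLast s = [] ∧ pref.dropLast ≠ [] then none
          else some (lcp2 pref.dropLast s) := ih
    rw [shrinkA, if_neg hsw]
    rw [dif_neg hd, ih', hlcp]
    simp [hd, hne]

theorem foldl_lcp2_nil (l : List (List Char)) : List.foldl lcp2 [] l = [] := by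
  induction l with
  | nil => rfl
  | cons s t ih => simp [List.foldl_cons, lcp2_nil_left, ih]

theorem loopA_eq (rest : List (List Char)) (pref : List Char) :
    loopA pref rest = List.foldl lcp2 pref rest := by
  induction rest generalizing pref with
  | nil => rfl
  | cons s t ih =>
    simp only [loopA]
    rw [shrinkA_eq]
    by_cases h : lcp2 pref s = [] ∧ pref ≠ []
    · rw [if_pos h]
      show ([] : List Char) = _
      rw [List.foldl_cons, h.1, foldl_lcp2_nil]
    · rw [if_neg h]
      show loopA (lcp2 pref s) t = _
      rw [List.foldl_cons]; exact ih _

theorem foldl_lcp2_prefix_init (l : List (List Char)) (a : List Char) :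
    List.foldl lcp2 a l <+: a := by
  induction l generalizing a with
  | nil => simp
  | cons s t ih => exact (ih (lcp2 a s)).trans (lcp2_prefix_left a s)

theorem foldl_lcp2_prefix_mem (l : List (List Char)) (a : List Char) :
    ∀ s ∈ l, List.foldl lcp2 a l <+: s := by
  induction l generalizing a with
  | nil => simp
  | cons s t ih =>
    intro x hx
    rcases List.mem_cons.mp hx with h | h
    · subst h
      exact (foldl_lcp2_prefix_init t (lcp2 a x)).trans (lcp2_prefix_right a x)
    · exact ih (lcp2 a s) x h

theorem scanCols_shift (cs : List (List Char)) (i : Nat) :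
    scanCols cs i = i + scanCols cs 0 := by
  induction cs generalizing i with
  | nil => simp [scanCols]
  | cons c t ih =>
    simp only [scanCols]
    split
    · simp
    · rw [ih (i + 1), ih 1]; omega

-- a nonempty list whose members all equal c has {c} as its set
theorem ofList_const (c : Char) (l : List Char) (h : ∀ x ∈ l, x = c) :
    PySem.Set.ofList (c :: l) = [c] := by
  rw [PySem.Set.ofList_cons]
  have hmem : ∀ x ∈ PySem.Set.ofList l, x = c :=
    fun x hx => h x ((PySem.Set.mem_ofList l x).mp hx)
  have hd : (PySem.Set.ofList l).discard c = [] := by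
    show List.filter _ _ = []
    rw [List.filter_eq_nil_iff]
    intro x hx
    simp [hmem x hx]
  rw [hd]

theorem cons_all_foldl (c : Char) (a : List Char) (l : List (List Char))
    (h : ∀ r ∈ l, r.headD ' ' = c ∧ r ≠ []) :
    List.foldl lcp2 (c :: a) l = c :: List.foldl lcp2 a (l.map (fun r => r.tail)) := by
  induction l generalizing a with
  | nil => simp
  | cons r t ih =>
    obtain ⟨hh, hn⟩ := h r (by simp)
    obtain ⟨d, r', rfl⟩ : ∃ d r', r = d :: r' := by
      cases r with | nil => simp at hn | cons d r' => exact ⟨d, r', rfl⟩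
    have hd : d = c := by simpa using hh
    subst hd
    simp only [List.map_cons, List.foldl_cons, List.tail_cons]
    have : lcp2 (d :: a) (d :: r') = d :: lcp2 a r' := by simp [lcp2]
    rw [this]
    exact ih (lcp2 a r') (fun x hx => h x (by simp [hx]))

-- a nodup list with two distinct members has length > 1
theorem one_lt_len_of_two_mem {l : List Char} {a b : Char} (ha : a ∈ l) (hb : b ∈ l)
    (hab : a ≠ b) : 1 < (l.length : Int) := by
  cases l with
  | nil => simp at ha
  | cons x t =>
    cases t with
    | nil =>
      simp at ha hb
      exact absurd (ha.trans hb.symm) hab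
    | cons y u => simp

theorem zip_scan_eq (s0 : List Char) (rest : List (List Char)) :
    List.take (scanCols (pyZipStar (s0 :: rest)) 0) s0 = List.foldl lcp2 s0 rest := by
  induction s0 generalizing rest with
  | nil =>
    rw [pyZipStar]
    simp [scanCols, foldl_lcp2_nil]
  | cons c s0' ih =>
    by_cases hE : rest.any (fun x => x.isEmpty) = true
    · -- some later row is empty: zip is empty and the fold collapses to []
      rw [pyZipStar]
      simp only [List.isEmpty_cons, Bool.false_or, hE, if_pos]
      simp only [scanCols, List.take_zero]
      obtain ⟨r, hr, hre⟩ := List.any_eq_true.mp hE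
      have hrnil : r = [] := List.isEmpty_iff.mp hre
      have := foldl_lcp2_prefix_mem rest (c :: s0') r hr
      rw [hrnil] at this
      exact (List.prefix_nil.mp this).symm
    · have hall : ∀ r ∈ rest, r ≠ [] := by
        intro r hr hnil
        exact hE (List.any_eq_true.mpr ⟨r, hr, by simp [hnil]⟩)
      rw [pyZipStar]
      simp only [List.isEmpty_cons, Bool.false_or, hE, if_neg, Bool.false_eq_true,
        not_false_iff]
      by_cases hH : ∀ r ∈ rest, r.headD ' ' = c
      · -- constant first column
        have hcol : PySem.Set.ofList (c :: rest.map (fun x => x.headD ' ')) = [c] := by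
          apply ofList_const
          intro x hx
          obtain ⟨r, hr, rfl⟩ := List.mem_map.mp hx
          exact hH r hr
        simp only [scanCols, List.headD_cons, hcol]
        rw [if_neg (by simp [PySem.Set.len])]
        rw [scanCols_shift, Nat.add_comm, List.take_succ_cons]
        rw [cons_all_foldl c s0' rest (fun r hr => ⟨hH r hr, hall r hr⟩)]
        show c :: List.take (scanCols (pyZipStar (s0' :: List.map (fun x => x.tail) rest)) 0) s0' = _
        rw [ih (rest.map (fun x => x.tail))]
      · -- two distinct entries in the first column: both sides are []
        push Not at hH
        obtain ⟨r, hr, hrh⟩ := hH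
        have hmm : 1 < PySem.Set.len
            (PySem.Set.ofList (c :: rest.map (fun x => x.headD ' '))) := by
          have hc : c ∈ PySem.Set.ofList (c :: rest.map (fun x => x.headD ' ')) :=
            (PySem.Set.mem_ofList _ _).mpr (by simp)
          have hd : r.headD ' ' ∈ PySem.Set.ofList (c :: rest.map (fun x => x.headD ' ')) :=
            (PySem.Set.mem_ofList _ _).mpr (by simp; right; exact ⟨r, hr, rfl⟩)
          exact one_lt_len_of_two_mem hd hc hrh
        simp only [scanCols, List.headD_cons, if_pos hmm, List.take_zero]
        -- the fold result is a common prefix of c::s0' and of r, whose heads differ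
        obtain ⟨d, r', rfl⟩ : ∃ d r', r = d :: r' := by
          cases r with
          | nil => exact absurd rfl (hall [] hr)
          | cons d r' => exact ⟨d, r', rfl⟩
        have hdc : d ≠ c := by simpa using hrh
        have h1 := foldl_lcp2_prefix_init rest (c :: s0')
        have h2 := foldl_lcp2_prefix_mem rest (c :: s0') _ hr
        cases hL : List.foldl lcp2 (c :: s0') rest with
        | nil => rfl
        | cons y L' =>
          rw [hL] at h1 h2
          rw [List.cons_prefix_cons] at h1 h2
          exact absurd (h2.1.symm.trans h1.1) hdc

theorem common_prefix_eq (strings : List String) :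
    common_prefix strings = common_prefix_alt strings := by
  cases strings with
  | nil => rfl
  | cons s0 rest =>
    show String.ofList (loopA s0.toList (rest.map String.toList))
        = String.ofList (PySem.Chars.slice s0.toList none
            (some ((scanCols (pyZipStar ((s0 :: rest).map String.toList)) 0 : Nat) : Int)))
    rw [loopA_eq]
    congr 1
    rw [PySem.Chars.slice_eq_listSlice, PySem.List.slice_to_natCast]
    simp only [List.map_cons]
    rw [zip_scan_eq s0.toList (rest.map String.toList)]

theorem entry_eq (p : String × List String) (acc : List (String × String)) :
    stepA acc p = acc ++ (prefix_entry p.1 p.2).toList := by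
  obtain ⟨key, slugs⟩ := p
  unfold stepA prefix_entry
  cases slugs with
  | nil => simp
  | cons s rest' =>
    cases rest' with
    | nil =>
      rw [if_neg (by simp : ¬(s :: [] : List String) = []),
        if_neg (by simp : ¬2 ≤ (s :: [] : List String).length),
        if_pos (by simp : (s :: [] : List String).length = 1),
        if_neg (by simp : ¬2 ≤ (s :: [] : List String).length),
        if_pos (by simp : (s :: [] : List String) ≠ [])]
      dsimp only
      split
      · simp
      · simp
    | cons s2 r2 =>
      rw [if_neg (by simp : ¬(s :: s2 :: r2 : List String) = []),
        if_pos (by simp : 2 ≤ (s :: s2 :: r2 : List String).length),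
        if_pos (by simp : 2 ≤ (s :: s2 :: r2 : List String).length),
        common_prefix_eq]
      dsimp only
      split
      · simp
      · simp

theorem fold_eq (l : List (String × List String)) (acc : List (String × String)) :
    l.foldl stepA acc = acc ++ (l.map (fun p => prefix_entry p.1 p.2)).filterMap id := by
  induction l generalizing acc with
  | nil => simp
  | cons p t ih =>
    rw [List.foldl_cons, ih, entry_eq]
    cases h : prefix_entry p.1 p.2 <;> simp [h]

theorem sorted_key_eq (xs : List (String × String)) :
    PySem.List.sorted xs (fun x => -(PySem.Str.len x.1)) false
      = PySem.List.sorted xs (fun x => PySem.Str.len x.1) true := by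
  unfold PySem.List.sorted
  simp only [Bool.false_eq_true, if_false, if_true]
  have h : (fun (a b : String × String) => decide (-PySem.Str.len a.1 < -PySem.Str.len b.1))
      = (fun (a b : String × String) => decide (PySem.Str.len b.1 < PySem.Str.len a.1)) := by
    funext a b
    rw [decide_eq_decide]
    exact neg_lt_neg_iff
  rw [h]

-- ===== VERDICT (by name: the statement is the Claim_ definition above) =====
theorem auto_generate_prefixes_py_spec : Claim_equal_auto_generate_prefixes_py := by
  intro by_service _
  show _ = _
  unfold auto_generate_prefixes_py auto_generate_prefixes_py_alt
  rw [fold_eq, List.nil_append, sorted_key_eq]
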